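-- pv_equiv track=rewrite | github.com/Mridul-Sharma17/BHUJAL-MITRA | src/agent.py | _extract_excerpt_for_terms
-- ===== SOURCE A (Python) =====
-- from typing import Any, Dict, List, Optional, Sequence, Tuple
--
-- def _extract_excerpt_for_terms(text: str, terms: Sequence[str], max_len: int = 520) -> str:
--     clean_text = " ".join((text or "").split())
--     if not clean_text:
--         return ""
--
--     lower_text = clean_text.lower()
--     best_pos = -1
--     for term in terms:
--         if not term:
--             continue
--         pos = lower_text.find(term)
--         if pos >= 0 and (best_pos < 0 or pos < best_pos):
--             best_pos = pos
--
--     if best_pos < 0: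
--         return clean_text[:max_len]
--
--     start = max(best_pos - 160, 0)
--     end = min(start + max_len, len(clean_text))
--     return clean_text[start:end]
-- ===== SOURCE B (Python) =====
-- def _extract_excerpt_for_terms(text, terms, max_len=520):
--     clean_text = " ".join((text or "").split())
--     if not clean_text:
--         return ""
--
--     lower_text = clean_text.lower()
--     valid = [t for t in terms if t]
--     best_pos = -1
--     for j in range(len(lower_text)):
--         if any(lower_text.startswith(t, j) for t in valid):
--             best_pos = j
--             break
--
--     if best_pos < 0:
--         return clean_text[:max_len]
--
--     start = max(best_pos - 160, 0)
--     end = min(start + max_len, len(clean_text))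
--     return clean_text[start:end]
-- ===== Notes on version B (the rewrite author's own statement) =====
-- stated objective: faster
-- what changed: Replaces the term-outer loop of per-term str.find calls keeping the minimum hit with a single left-to-right scan over text positions that stops at the first index where any non-empty term starts.
import Mathlib
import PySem

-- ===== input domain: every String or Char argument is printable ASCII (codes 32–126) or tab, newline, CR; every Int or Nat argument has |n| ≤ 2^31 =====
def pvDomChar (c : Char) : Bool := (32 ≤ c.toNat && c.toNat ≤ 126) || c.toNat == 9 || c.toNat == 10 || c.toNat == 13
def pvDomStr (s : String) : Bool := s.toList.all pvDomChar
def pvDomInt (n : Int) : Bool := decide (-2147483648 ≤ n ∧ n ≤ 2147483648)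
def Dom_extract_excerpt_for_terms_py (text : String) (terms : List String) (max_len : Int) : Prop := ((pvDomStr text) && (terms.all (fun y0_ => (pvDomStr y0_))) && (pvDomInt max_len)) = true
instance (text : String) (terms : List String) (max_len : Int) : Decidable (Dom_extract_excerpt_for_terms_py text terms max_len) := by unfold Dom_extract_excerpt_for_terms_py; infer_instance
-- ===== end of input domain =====

-- B replaces A's per-term find loop (minimum hit position) by a single left-to-right scan over
-- text positions that stops at the first index where any non-empty term starts; cleaning and
-- slicing are unchanged; B stops at the first match instead of running a full find per term (measured faster in a timing run on the generated inputs).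


-- ===== PORT A =====
def extract_excerpt_for_terms_py (text : String) (terms : List String) (max_len : Int) : String :=
  let clean_text := PySem.Str.join " " (PySem.Str.split₀ text)
  if PySem.Str.len clean_text = 0 then "" else
    let lower_text := PySem.Str.lower clean_text
    let best_pos := terms.foldl (fun best term =>
      if PySem.Str.len term = 0 then best
      else
        let pos := PySem.Str.find lower_text term
        if 0 ≤ pos ∧ (best < 0 ∨ pos < best) then pos else best) (-1 : Int)
    if best_pos < 0 then PySem.Str.slice clean_text none (some max_len)
    else
      let start := max (best_pos - 160) 0
      let stop := min (start + max_len) (PySem.Str.len clean_text)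
      PySem.Str.slice clean_text (some start) (some stop)

-- ===== PORT B =====
-- Source B's index loop 'for j in range(len(lower_text)): if any(lower_text.startswith(t, j)): break'
def pvScanB (valid : List String) : List Char → Int → Int
  | [], _ => -1
  | c :: rest, j =>
      if valid.any (fun t => PySem.Chars.startswith (c :: rest) t.toList) then j
      else pvScanB valid rest (j + 1)

def extract_excerpt_for_terms_py_alt (text : String) (terms : List String) (max_len : Int) : String :=
  let clean_text := PySem.Str.join " " (PySem.Str.split₀ text)
  if PySem.Str.len clean_text = 0 then "" else
    let lower_text := PySem.Str.lower clean_text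
    let valid := terms.filter (fun t => ¬ PySem.Str.len t = 0)
    let best_pos := pvScanB valid lower_text.toList 0
    if best_pos < 0 then PySem.Str.slice clean_text none (some max_len)
    else
      let start := max (best_pos - 160) 0
      let stop := min (start + max_len) (PySem.Str.len clean_text)
      PySem.Str.slice clean_text (some start) (some stop)

-- ===== PRECONDITION & SPEC =====
def Spec_extract_excerpt_for_terms_py (text : String) (terms : List String) (max_len : Int) (out : String) : Prop := out = extract_excerpt_for_terms_py_alt text terms max_len
instance (text : String) (terms : List String) (max_len : Int) (out : String) : Decidable (Spec_extract_excerpt_for_terms_py text terms max_len out) := by unfold Spec_extract_excerpt_for_terms_py; infer_instance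

-- ===== CLAIM (what is proved, stated in full; the proofs are below) =====
def Claim_equal_extract_excerpt_for_terms_py : Prop := ∀ (text : String) (terms : List String) (max_len : Int), Dom_extract_excerpt_for_terms_py text terms max_len → Spec_extract_excerpt_for_terms_py text terms max_len (extract_excerpt_for_terms_py text terms max_len)

-- ===== LEMMAS AND PROOFS =====

-- A's fold step, abstracted over the lowered text as a char list
def pvStepA (ls : List Char) (best : Int) (term : String) : Int :=
  if PySem.Str.len term = 0 then best
  else
    let pos := PySem.Chars.find ls term.toList
    if 0 ≤ pos ∧ (best < 0 ∨ pos < best) then pos else best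

lemma pvFold_mono (ls : List Char) (terms : List String) (b : Int) (hb : 0 ≤ b) :
    0 ≤ terms.foldl (pvStepA ls) b ∧ terms.foldl (pvStepA ls) b ≤ b := by
  induction terms generalizing b with
  | nil => exact ⟨hb, le_refl b⟩
  | cons hd tl ih =>
    simp only [List.foldl_cons]
    have hstep : 0 ≤ pvStepA ls b hd ∧ pvStepA ls b hd ≤ b := by
      unfold pvStepA
      by_cases h0 : PySem.Str.len hd = 0
      · rw [if_pos h0]; exact ⟨hb, le_refl b⟩
      · rw [if_neg h0]
        by_cases h1 : 0 ≤ PySem.Chars.find ls hd.toList ∧ (b < 0 ∨ PySem.Chars.find ls hd.toList < b)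
        · simp only [h1, if_true]; refine ⟨h1.1, ?_⟩; rcases h1.2 with h | h <;> omega
        · rw [if_neg h1]; exact ⟨hb, le_refl b⟩
    obtain ⟨h1, h2⟩ := ih (pvStepA ls b hd) hstep.1
    exact ⟨h1, le_trans h2 hstep.2⟩

lemma pvFold_le_find (ls : List Char) (terms : List String) (b : Int)
    (t : String) (ht : t ∈ terms) (hne : t.toList ≠ []) (hf : 0 ≤ PySem.Chars.find ls t.toList) :
    0 ≤ terms.foldl (pvStepA ls) b ∧ terms.foldl (pvStepA ls) b ≤ PySem.Chars.find ls t.toList := by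
  induction terms generalizing b with
  | nil => cases ht
  | cons hd tl ih =>
    simp only [List.foldl_cons]
    rcases List.mem_cons.mp ht with rfl | htl
    · have hlen : ¬ PySem.Str.len t = 0 := by
        simpa [PySem.Str.len_eq] using List.length_pos_iff.mpr hne |>.ne'
      have hacc : 0 ≤ pvStepA ls b t ∧ pvStepA ls b t ≤ PySem.Chars.find ls t.toList := by
        unfold pvStepA; simp only [hlen, if_false]
        split_ifs with h1
        · exact ⟨hf, le_refl _⟩
        · push Not at h1
          have := h1 hf
          exact ⟨by omega, by omega⟩
      obtain ⟨m1, m2⟩ := pvFold_mono ls tl (pvStepA ls b t) hacc.1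
      exact ⟨m1, le_trans m2 hacc.2⟩
    · exact ih (pvStepA ls b hd) htl

lemma pvFold_mem (ls : List Char) (terms : List String) (b : Int) :
    terms.foldl (pvStepA ls) b = b ∨
      ∃ t ∈ terms, t.toList ≠ [] ∧ terms.foldl (pvStepA ls) b = PySem.Chars.find ls t.toList ∧
        0 ≤ terms.foldl (pvStepA ls) b := by
  induction terms generalizing b with
  | nil => left; rfl
  | cons hd tl ih =>
    simp only [List.foldl_cons]
    rcases ih (pvStepA ls b hd) with h | ⟨t, htl, hne, heq, hpos⟩
    · rw [h]
      unfold pvStepA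
      by_cases h0 : PySem.Str.len hd = 0
      · rw [if_pos h0]; exact Or.inl rfl
      · rw [if_neg h0]
        by_cases h1 : 0 ≤ PySem.Chars.find ls hd.toList ∧ (b < 0 ∨ PySem.Chars.find ls hd.toList < b)
        · rw [if_pos h1]
          right
          refine ⟨hd, List.mem_cons_self, ?_, rfl, h1.1⟩
          intro hl
          exact h0 (by simpa [PySem.Str.len_eq] using congrArg List.length hl)
        · rw [if_neg h1]; exact Or.inl rfl
    · right; exact ⟨t, List.mem_cons_of_mem _ htl, hne, heq, hpos⟩

lemma pvScan_spec (valid : List String) (u : List Char) :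
    ∀ k : Nat,
      (pvScanB valid u (k : Int) = -1 ∧ ∀ i : Nat, i < u.length → ¬ (∃ t ∈ valid, t.toList <+: u.drop i)) ∨
      (∃ i : Nat, (∃ t ∈ valid, t.toList <+: u.drop i) ∧
        (∀ i' : Nat, i' < i → ¬ (∃ t ∈ valid, t.toList <+: u.drop i')) ∧
        pvScanB valid u (k : Int) = ((k + i : Nat) : Int)) := by
  induction u with
  | nil => intro k; left; exact ⟨rfl, by simp⟩
  | cons c rest ih =>
    intro k
    unfold pvScanB
    by_cases h0 : (valid.any (fun t => PySem.Chars.startswith (c :: rest) t.toList)) = true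
    · simp only [h0, if_true]
      right
      refine ⟨0, ?_, by omega, by simp⟩
      rcases List.any_eq_true.mp h0 with ⟨t, htm, hsw⟩
      exact ⟨t, htm, by simpa using (PySem.Chars.startswith_iff _ _).mp hsw⟩
    · simp only [h0, Bool.false_eq_true, if_false]
      have hP0 : ¬ (∃ t ∈ valid, t.toList <+: (c :: rest).drop 0) := by
        intro ⟨t, htm, hp⟩
        exact h0 (List.any_eq_true.mpr ⟨t, htm, (PySem.Chars.startswith_iff _ _).mpr (by simpa using hp)⟩)
      have hk1 : ((k : Int) + 1) = ((k + 1 : Nat) : Int) := by push_cast; ring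
      rw [hk1]
      rcases ih (k + 1) with ⟨hres, hnone⟩ | ⟨i, hi, hmin, hres⟩
      · left
        refine ⟨hres, ?_⟩
        intro i hilen
        cases i with
        | zero => exact hP0
        | succ n => exact fun h => hnone n (by simpa using hilen) (by simpa using h)
      · right
        refine ⟨i + 1, by simpa using hi, ?_, by rw [hres]; push_cast; ring⟩
        intro i' hi'
        cases i' with
        | zero => exact hP0
        | succ n => exact fun h => hmin n (by omega) (by simpa using h)

lemma pvFind_nonneg_of_prefix (ls : List Char) (t : String) (i : Nat)
    (hpre : t.toList <+: ls.drop i) : 0 ≤ PySem.Chars.find ls t.toList :=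
  (PySem.Chars.find_nonneg_iff ls t.toList).mpr ((PySem.Chars.isIn_iff_infix _ _).mp
    ((PySem.Chars.exists_prefix_drop_iff_isIn _ _).mp ⟨i, hpre⟩))

-- A's minimum-of-finds equals B's first index where a non-empty term starts
lemma pvBest_eq (ls : List Char) (terms : List String) :
    terms.foldl (pvStepA ls) (-1) =
      pvScanB (terms.filter (fun t => ¬ PySem.Str.len t = 0)) ls 0 := by
  set valid := terms.filter (fun t => ¬ PySem.Str.len t = 0) with hvalid
  have hmem : ∀ t : String, t ∈ valid ↔ t ∈ terms ∧ t.toList ≠ [] := by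
    intro t
    simp [hvalid, List.mem_filter, PySem.Str.len_eq]
  have h0 : ((0 : Nat) : Int) = 0 := rfl
  rcases pvScan_spec valid ls 0 with ⟨hres, hnone⟩ | ⟨i, ⟨t1, ht1v, ht1p⟩, hmin, hres⟩
  · rw [h0] at hres
    rw [hres]
    rcases pvFold_mem ls terms (-1) with h | ⟨t, htm, hne, heq, hpos⟩
    · exact h
    · exfalso
      have hfs := PySem.Chars.find_spec (s := ls) (sub := t.toList) (heq ▸ hpos)
      have hlt : (PySem.Chars.find ls t.toList).toNat < ls.length := by
        have hle := PySem.Chars.find_le_length ls t.toList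
        rcases lt_or_eq_of_le hle with hl | hl
        · omega
        · exfalso
          have : t.toList <+: ls.drop ((PySem.Chars.find ls t.toList).toNat) := hfs.1
          rw [show (PySem.Chars.find ls t.toList).toNat = ls.length by omega] at this
          simp only [List.drop_length] at this
          exact hne (List.prefix_nil.mp this)
      exact hnone _ hlt ⟨t, (hmem t).mpr ⟨htm, hne⟩, hfs.1⟩
  · rw [h0] at hres
    rw [hres]
    have ht1 := (hmem t1).mp ht1v
    have hf1 : 0 ≤ PySem.Chars.find ls t1.toList := pvFind_nonneg_of_prefix ls t1 i ht1p
    obtain ⟨hr0, hrle⟩ := pvFold_le_find ls terms (-1) t1 ht1.1 ht1.2 hf1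
    set r := terms.foldl (pvStepA ls) (-1) with hr
    have hfle : PySem.Chars.find ls t1.toList ≤ (i : Int) := by
      by_contra hgt
      exact (PySem.Chars.find_spec hf1).2 i (by omega) ht1p
    rcases pvFold_mem ls terms (-1) with h | ⟨t2, ht2m, ht2ne, heq2, _⟩
    · omega
    · have hf2pos : 0 ≤ PySem.Chars.find ls t2.toList := heq2 ▸ hr0
      have hpre2 : t2.toList <+: ls.drop ((PySem.Chars.find ls t2.toList).toNat) :=
        (PySem.Chars.find_spec hf2pos).1
      have hPi : ¬ ((PySem.Chars.find ls t2.toList).toNat < i) := by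
        intro hlt
        exact hmin _ hlt ⟨t2, (hmem t2).mpr ⟨ht2m, ht2ne⟩, hpre2⟩
      omega

lemma pvMain (lt : String) (terms : List String) :
    terms.foldl (fun best term =>
      if PySem.Str.len term = 0 then best
      else
        let pos := PySem.Str.find lt term
        if 0 ≤ pos ∧ (best < 0 ∨ pos < best) then pos else best) (-1 : Int) =
    pvScanB (terms.filter (fun t => ¬ PySem.Str.len t = 0)) lt.toList 0 := by
  have hstep : (fun (best : Int) (term : String) =>
      if PySem.Str.len term = 0 then best
      else
        let pos := PySem.Str.find lt term
        if 0 ≤ pos ∧ (best < 0 ∨ pos < best) then pos else best) = pvStepA lt.toList := by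
    funext b t
    simp [pvStepA, PySem.Str.find_eq]
  rw [hstep]
  exact pvBest_eq lt.toList terms

-- ===== VERDICT (by name: the statement is the Claim_ definition above) =====
theorem extract_excerpt_for_terms_py_spec : Claim_equal_extract_excerpt_for_terms_py := by
  intro text terms max_len _
  unfold Spec_extract_excerpt_for_terms_py
  simp only [extract_excerpt_for_terms_py, extract_excerpt_for_terms_py_alt, pvMain]
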